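-- pv_equiv track=rewrite | github.com/DavTho1983/Flask_Validators_tut | perfect_numbers.py | listInRange
-- ===== SOURCE A (Python) =====
-- def classify(num):
--     if num == 0:
--         return 'not a positive integer. Please input a positive integer'
--     factors = []
--
--     for i in range(1, num):
--         if num % i == 0:
--             factors.append(i)
--
--     if sum(factors) > num:
--         return 'abundant'
--     elif sum(factors) < num:
--         return 'deficient'
--     return 'perfect'
--
-- def listInRange(start, end, aliquot):
--     if start >= end:
--         return 'You must choose numbers where the start value is less than the end value'
--
--     aliList = []
--
--     for i in range(start, end + 1):
--         if classify(i) == aliquot: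
--             aliList.append(i)
--
--     if aliList == []:
--         return 'There are no ' + str(aliquot) + ' numbers in this range'
--     return ', '.join(map(str, aliList))
-- ===== SOURCE B (Python) =====
-- def _label(n):
--     # classification via the paired-divisor sum up to sqrt(n) instead of scanning 1..n-1
--     if n == 0:
--         return 'not a positive integer. Please input a positive integer'
--     s = 0
--     d = 1
--     while d * d <= n:
--         if n % d == 0:
--             q = n // d
--             s += d
--             if q != d:
--                 s += q
--         d += 1
--     s -= n  # aliquot sum = sigma(n) - n; for n < 0 the loop never runs and s = -n
--     if s > n:
--         return 'abundant'
--     if s < n: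
--         return 'deficient'
--     return 'perfect'
--
-- def listInRange(start, end, aliquot):
--     if start >= end:
--         return 'You must choose numbers where the start value is less than the end value'
--     hits = [str(n) for n in range(start, end + 1) if _label(n) == aliquot]
--     if not hits:
--         return 'There are no ' + aliquot + ' numbers in this range'
--     return ', '.join(hits)
-- ===== Notes on version B (the rewrite author's own statement) =====
-- stated objective: alternative
-- what changed: classify's scan over all candidates 1..n-1 is replaced by a paired-divisor sum that walks d only up to sqrt(n), adding d and n//d together; the result list is built as a comprehension of strings instead of an int list mapped at join time.
import Mathlib
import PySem

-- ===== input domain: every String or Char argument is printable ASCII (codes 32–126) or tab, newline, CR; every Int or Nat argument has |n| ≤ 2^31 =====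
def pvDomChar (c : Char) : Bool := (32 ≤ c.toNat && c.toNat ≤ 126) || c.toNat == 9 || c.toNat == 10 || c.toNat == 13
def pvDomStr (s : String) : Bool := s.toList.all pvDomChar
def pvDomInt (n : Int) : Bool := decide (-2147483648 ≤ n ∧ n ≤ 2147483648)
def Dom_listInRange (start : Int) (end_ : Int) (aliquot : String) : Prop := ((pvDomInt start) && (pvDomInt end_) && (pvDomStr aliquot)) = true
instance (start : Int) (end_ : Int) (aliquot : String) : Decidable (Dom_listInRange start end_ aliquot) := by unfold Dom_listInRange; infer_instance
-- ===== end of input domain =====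

-- B replaces A's per-number divisor scan over 1..n-1 by the paired-divisor sum that walks d only up to sqrt(n) (objective: alternative algorithm).


-- ===== PORT A =====
def pyClassify (num : Int) : String :=
  if num = 0 then "not a positive integer. Please input a positive integer"
  else
    let factors := (PySem.List.pyRange 1 num 1).foldl
      (fun acc i => if PySem.Int.mod num i = 0 then acc ++ [i] else acc) []
    if factors.sum > num then "abundant"
    else if factors.sum < num then "deficient"
    else "perfect"

def listInRange (start : Int) (end_ : Int) (aliquot : String) : String :=
  if start ≥ end_ then "You must choose numbers where the start value is less than the end value"
  else
    let aliList := (PySem.List.pyRange start (end_ + 1) 1).foldl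
      (fun acc i => if pyClassify i = aliquot then acc ++ [i] else acc) []
    if aliList = [] then "There are no " ++ aliquot ++ " numbers in this range"
    else PySem.Str.join ", " (aliList.map PySem.Int.toStr)

-- ===== PORT B =====
-- while d*d <= n: collect d and (n // d) when d divides n
def altLoop (n : Int) (d : Int) (s : Int) : Int :=
  if _h : d * d ≤ n then
    altLoop n (d + 1)
      (if PySem.Int.mod n d = 0 then
        (if PySem.Int.floordiv n d ≠ d then s + d + PySem.Int.floordiv n d else s + d)
      else s)
  else s
termination_by (n + 1 - d).toNat
decreasing_by
  have hd : d ≤ n := by nlinarith [sq_nonneg d, sq_nonneg (d - 1)]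
  omega

def altLabel (n : Int) : String :=
  if n = 0 then "not a positive integer. Please input a positive integer"
  else
    let s := altLoop n 1 0 - n
    if s > n then "abundant"
    else if s < n then "deficient"
    else "perfect"

def listInRange_alt (start : Int) (end_ : Int) (aliquot : String) : String :=
  if start ≥ end_ then "You must choose numbers where the start value is less than the end value"
  else
    let hits := ((PySem.List.pyRange start (end_ + 1) 1).filter
      (fun n => altLabel n = aliquot)).map PySem.Int.toStr
    if hits = [] then "There are no " ++ aliquot ++ " numbers in this range"
    else PySem.Str.join ", " hits

-- ===== PRECONDITION & SPEC =====
def Spec_listInRange (start : Int) (end_ : Int) (aliquot : String) (out : String) : Prop := out = listInRange_alt start end_ aliquot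
instance (start : Int) (end_ : Int) (aliquot : String) (out : String) : Decidable (Spec_listInRange start end_ aliquot out) := by unfold Spec_listInRange; infer_instance

-- ===== CLAIM (what is proved, stated in full; the proofs are below) =====
def Claim_equal_listInRange : Prop := ∀ (start : Int) (end_ : Int) (aliquot : String), Dom_listInRange start end_ aliquot → Spec_listInRange start end_ aliquot (listInRange start end_ aliquot)

-- ===== LEMMAS AND PROOFS =====

-- contribution of a candidate small divisor k in B's loop, Nat side
def pvContrib (n k : Nat) : Nat := if k ∣ n then (if n / k ≠ k then k + n / k else k) else 0

-- B's loop computes the remaining paired contributions over Ico D (sqrt N + 1)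
theorem altLoop_eq_sum (N : Nat) (F : Nat) : ∀ (D : Nat) (s : Int), 1 ≤ D → F = Nat.sqrt N + 1 - D →
    altLoop (N : Int) (D : Int) s = s + ∑ k ∈ Finset.Ico D (Nat.sqrt N + 1), (pvContrib N k : Int) := by
  induction F with
  | zero =>
    intro D s hD hF
    have hstop : ¬ ((D : Int) * (D : Int) ≤ (N : Int)) := by
      have : ¬ (D * D ≤ N) := fun hc => by
        have := Nat.le_sqrt.mpr hc; omega
      exact_mod_cast fun hc => this (by exact_mod_cast hc)
    rw [altLoop]
    simp [hstop, Finset.Ico_eq_empty_of_le (by omega : Nat.sqrt N + 1 ≤ D)]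
  | succ F ih =>
    intro D s hD hF
    have hDs : D ≤ Nat.sqrt N := by omega
    have hgo : ((D : Int) * (D : Int) ≤ (N : Int)) := by exact_mod_cast Nat.le_sqrt.mp hDs
    rw [altLoop]
    simp only [hgo, dif_pos]
    have hcast : ((D : Int) + 1) = ((D + 1 : Nat) : Int) := by push_cast; ring
    rw [hcast, ih (D + 1) _ (by omega) (by omega)]
    rw [Finset.sum_eq_sum_Ico_succ_bot (by omega : D < Nat.sqrt N + 1)]
    have hmod : PySem.Int.mod (N : Int) (D : Int) = ((N % D : Nat) : Int) := PySem.Int.mod_natCast N D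
    have hdiv : PySem.Int.floordiv (N : Int) (D : Int) = ((N / D : Nat) : Int) := PySem.Int.floordiv_natCast N D
    rw [hmod, hdiv]
    unfold pvContrib
    have hc1 : (((N % D : Nat) : Int) = 0) ↔ (D ∣ N) := by
      rw [Int.natCast_eq_zero]
      exact Nat.dvd_iff_mod_eq_zero.symm
    have hc2 : (((N / D : Nat) : Int) = (D : Int)) ↔ (N / D = D) := Nat.cast_inj
    simp only [ne_eq, hc1, hc2]
    split_ifs <;> push_cast <;> ring

-- the paired small-divisor sum is the full divisor sum
theorem pvContrib_sum (N : Nat) (hN : 0 < N) :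
    ∑ k ∈ Finset.Ico 1 (Nat.sqrt N + 1), pvContrib N k = ∑ d ∈ N.divisors, d := by
  have hfil : (Finset.Ico 1 (Nat.sqrt N + 1)).filter (· ∣ N)
      = N.divisors.filter (· ≤ Nat.sqrt N) := by
    ext k
    simp only [Finset.mem_filter, Finset.mem_Ico, Nat.mem_divisors, Nat.lt_succ_iff]
    constructor
    · rintro ⟨⟨h1, h2⟩, h3⟩; exact ⟨⟨h3, hN.ne'⟩, h2⟩
    · rintro ⟨⟨h3, _⟩, h2⟩; exact ⟨⟨Nat.pos_of_dvd_of_pos h3 hN, h2⟩, h3⟩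
  have step1 : ∑ k ∈ Finset.Ico 1 (Nat.sqrt N + 1), pvContrib N k
      = ∑ k ∈ N.divisors.filter (· ≤ Nat.sqrt N), (k + if N / k ≠ k then N / k else 0) := by
    rw [← hfil, Finset.sum_filter]
    apply Finset.sum_congr rfl
    intro k _
    unfold pvContrib
    split_ifs <;> omega
  have step2 : ∑ k ∈ (N.divisors.filter (· ≤ Nat.sqrt N)).filter (fun k => N / k ≠ k), N / k
      = ∑ j ∈ N.divisors.filter (fun k => ¬ k ≤ Nat.sqrt N), j := by
    apply Finset.sum_nbij' (i := fun k => N / k) (j := fun k => N / k)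
    · intro a ha
      simp only [Finset.mem_filter, Nat.mem_divisors] at ha ⊢
      obtain ⟨⟨⟨hd, _⟩, hle⟩, hne⟩ := ha
      have ha0 : 0 < a := Nat.pos_of_dvd_of_pos hd hN
      have hm0 : 0 < N / a := Nat.div_pos (Nat.le_of_dvd hN hd) ha0
      have hprod : a * (N / a) = N := Nat.mul_div_cancel' hd
      refine ⟨⟨Nat.div_dvd_of_dvd hd, hN.ne'⟩, ?_⟩
      intro hle2
      have hs : Nat.sqrt N * Nat.sqrt N ≤ N := Nat.sqrt_le N
      have h1 : a * (N / a) ≤ Nat.sqrt N * (N / a) := Nat.mul_le_mul_right _ hle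
      have h2 : Nat.sqrt N * (N / a) ≤ Nat.sqrt N * Nat.sqrt N := Nat.mul_le_mul_left _ hle2
      have heq1 : a * (N / a) = Nat.sqrt N * (N / a) := by omega
      have heq2 : Nat.sqrt N * (N / a) = Nat.sqrt N * Nat.sqrt N := by omega
      have has : a = Nat.sqrt N := Nat.eq_of_mul_eq_mul_right hm0 heq1
      have hsp : 0 < Nat.sqrt N := has ▸ ha0
      have hms : N / a = Nat.sqrt N := Nat.eq_of_mul_eq_mul_left hsp heq2
      exact hne (hms.trans has.symm)
    · intro b hb
      simp only [Finset.mem_filter, Nat.mem_divisors, not_le] at hb ⊢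
      obtain ⟨⟨hd, _⟩, hgt⟩ := hb
      have hb0 : 0 < b := Nat.pos_of_dvd_of_pos hd hN
      have hprod : b * (N / b) = N := Nat.mul_div_cancel' hd
      have hNlt : N < b * b := Nat.sqrt_lt.mp hgt
      have hmb : N / b < b := by
        by_contra hc
        push Not at hc
        nlinarith
      have hsmall : N / b ≤ Nat.sqrt N := by
        rw [Nat.le_sqrt]
        calc N / b * (N / b) ≤ N / b * b := Nat.mul_le_mul_left _ hmb.le
        _ = N := by rw [Nat.mul_comm, hprod]
      refine ⟨⟨⟨Nat.div_dvd_of_dvd hd, hN.ne'⟩, hsmall⟩, ?_⟩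
      rw [Nat.div_div_self hd hN.ne']
      omega
    · intro a ha
      simp only [Finset.mem_filter, Nat.mem_divisors] at ha
      exact Nat.div_div_self ha.1.1.1 hN.ne'
    · intro b hb
      simp only [Finset.mem_filter, Nat.mem_divisors] at hb
      exact Nat.div_div_self hb.1.1 hN.ne'
    · intro a _; rfl
  calc ∑ k ∈ Finset.Ico 1 (Nat.sqrt N + 1), pvContrib N k
      = ∑ k ∈ N.divisors.filter (· ≤ Nat.sqrt N), (k + if N / k ≠ k then N / k else 0) := step1
    _ = ∑ k ∈ N.divisors.filter (· ≤ Nat.sqrt N), k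
        + ∑ k ∈ N.divisors.filter (· ≤ Nat.sqrt N), (if N / k ≠ k then N / k else 0) :=
        Finset.sum_add_distrib
    _ = ∑ k ∈ N.divisors.filter (· ≤ Nat.sqrt N), k
        + ∑ k ∈ (N.divisors.filter (· ≤ Nat.sqrt N)).filter (fun k => N / k ≠ k), N / k := by
        exact congrArg _ (Finset.sum_filter _ _).symm
    _ = ∑ k ∈ N.divisors.filter (· ≤ Nat.sqrt N), k
        + ∑ j ∈ N.divisors.filter (fun k => ¬ k ≤ Nat.sqrt N), j := by rw [step2]
    _ = ∑ d ∈ N.divisors, d := Finset.sum_filter_add_sum_filter_not _ _ _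

theorem list_sum_filter_map (l : List Nat) (p : Nat → Bool) (f : Nat → Int) :
    ((l.filter p).map f).sum = (l.map (fun x => if p x then f x else 0)).sum := by
  induction l with
  | nil => rfl
  | cons a t ih => by_cases h : p a <;> simp [h, ih]

-- A's factor list sums to the proper-divisor sum
theorem factors_sum (N : Nat) (hN : 0 < N) :
    (((PySem.List.pyRange 1 (N : Int) 1).foldl
      (fun acc i => if PySem.Int.mod (N : Int) i = 0 then acc ++ [i] else acc) []) : List Int).sum
      = ((∑ d ∈ N.properDivisors, d : Nat) : Int) := by
  rw [PySem.List.foldl_append_ite_eq_filter, List.nil_append]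
  rw [PySem.List.pyRange_one]
  have hcast : (((N : Int) - 1).toNat) = N - 1 := by omega
  rw [hcast, List.filter_map, list_sum_filter_map]
  rw [show ∀ g : Nat → Int, ((List.range (N - 1)).map g).sum = ∑ k ∈ Finset.range (N - 1), g k
    from fun g => rfl]
  have hcong : ∑ k ∈ Finset.range (N - 1),
        (if ((fun i => decide (PySem.Int.mod (N : Int) i = 0)) ∘ (fun k : Nat => (1 : Int) + k)) k = true
          then (1 : Int) + k else 0)
      = ∑ k ∈ Finset.range (N - 1), (if (1 + k) ∣ N then ((1 + k : Nat) : Int) else 0) := by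
    apply Finset.sum_congr rfl
    intro k _
    have hiff : (PySem.Int.mod (N : Int) ((1 : Int) + k) = 0) ↔ ((1 + k) ∣ N) := by
      rw [PySem.Int.mod_eq_zero_iff_dvd]
      rw [show ((1 : Int) + k) = ((1 + k : Nat) : Int) by push_cast; ring]
      exact Int.natCast_dvd_natCast
    by_cases h : (1 + k) ∣ N
    · simp only [Function.comp, hiff.mpr h, decide_true, if_true, h]
      push_cast; ring
    · simp only [Function.comp, h, if_false]
      rw [if_neg]
      simp only [decide_eq_true_eq]
      exact fun hc => h (hiff.mp hc)
  rw [hcong]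
  have hshift : ∑ k ∈ Finset.range (N - 1), (if (1 + k) ∣ N then ((1 + k : Nat) : Int) else 0)
      = ∑ d ∈ Finset.Ico 1 N, (if d ∣ N then ((d : Nat) : Int) else 0) := by
    rw [Finset.sum_Ico_eq_sum_range]
  rw [hshift]
  have hpd : ((Finset.Ico 1 N).filter (· ∣ N)) = N.properDivisors := by
    ext k
    simp only [Finset.mem_filter, Finset.mem_Ico, Nat.mem_properDivisors]
    constructor
    · rintro ⟨⟨h1, h2⟩, h3⟩; exact ⟨h3, h2⟩
    · rintro ⟨h3, h2⟩; exact ⟨⟨Nat.pos_of_dvd_of_pos h3 hN, h2⟩, h3⟩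
  rw [← Finset.sum_filter, hpd]
  push_cast
  rfl

-- the two classifiers agree on every integer
theorem classify_eq (i : Int) : pyClassify i = altLabel i := by
  unfold pyClassify altLabel
  by_cases h0 : i = 0
  · simp [h0]
  · simp only [h0, if_false]
    by_cases hpos : 0 < i
    · -- positive: both sums are the proper-divisor sum
      obtain ⟨N, rfl⟩ : ∃ N : Nat, i = (N : Int) := ⟨i.toNat, by omega⟩
      have hN : 0 < N := by exact_mod_cast hpos
      have hA := factors_sum N hN
      have hB : altLoop (N : Int) 1 0 - (N : Int) = ((∑ d ∈ N.properDivisors, d : Nat) : Int) := by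
        rw [show ((1 : Int)) = ((1 : Nat) : Int) by norm_num]
        rw [altLoop_eq_sum N (Nat.sqrt N) 1 0 (le_refl 1) (by omega)]
        rw [show ∑ k ∈ Finset.Ico 1 (Nat.sqrt N + 1), ((pvContrib N k : Int))
            = ((∑ k ∈ Finset.Ico 1 (Nat.sqrt N + 1), pvContrib N k : Nat) : Int) by push_cast; rfl]
        rw [pvContrib_sum N hN]
        rw [Nat.sum_divisors_eq_sum_properDivisors_add_self]
        push_cast; ring
      rw [hA, hB]
    · -- negative: empty loop on both sides
      have hneg : i < 0 := by omega
      rw [PySem.List.pyRange_one_eq_nil (by omega : i ≤ 1)]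
      rw [altLoop]
      rw [dif_neg (by omega : ¬ (1 * 1 ≤ i))]
      simp only [List.foldl_nil, List.sum_nil]
      rw [if_pos (by omega : (0 : Int) > i), if_pos (by omega : 0 - i > i)]

-- ===== VERDICT (by name: the statement is the Claim_ definition above) =====
theorem listInRange_spec : Claim_equal_listInRange := by
  intro start end_ aliquot _
  unfold Spec_listInRange listInRange listInRange_alt
  by_cases h : start ≥ end_
  · simp [h]
  · simp only [h, if_false]
    rw [PySem.List.foldl_append_ite_eq_filter]
    have hc : (PySem.List.pyRange start (end_ + 1) 1).filter (fun x => decide (pyClassify x = aliquot))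
        = (PySem.List.pyRange start (end_ + 1) 1).filter (fun n => decide (altLabel n = aliquot)) := by
      apply List.filter_congr
      intro x _
      rw [classify_eq]
    simp only [List.nil_append, hc]
    by_cases he : (PySem.List.pyRange start (end_ + 1) 1).filter (fun n => decide (altLabel n = aliquot)) = []
    · simp [he]
    · simp [he, List.map_eq_nil_iff]
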